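-- pv_equiv track=rewrite | github.com/DavidCho1999/codevault | pipeline/_experiments/complex_table_test.py | filldown_none_cells
-- ===== SOURCE A (Python) =====
-- from copy import deepcopy
--
-- def filldown_none_cells(table_data):
--     """None 셀을 위의 값으로 채우기"""
--     if not table_data:
--         return table_data
--     result = deepcopy(table_data)
--     cols = len(result[0]) if result else 0
--     for col in range(cols):
--         last_value = None
--         for row in range(len(result)):
--             if result[row][col] is None or result[row][col] == '':
--                 result[row][col] = last_value
--             else:
--                 last_value = result[row][col]
--     return result
-- ===== SOURCE B (Python) =====
-- def filldown_none_cells(table_data):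
--     """None 셀을 위의 값으로 채우기"""
--     if not table_data:
--         return table_data
--     cols = len(table_data[0])
--     fill = [None] * cols
--     result = []
--     for row in table_data:
--         new_row = []
--         for c in range(cols):
--             cell = row[c]
--             if cell is None or cell == '':
--                 new_row.append(fill[c])
--             else:
--                 fill[c] = cell
--                 new_row.append(cell)
--         new_row.extend(row[cols:])
--         result.append(new_row)
--     return result
-- ===== Notes on version B (the rewrite author's own statement) =====
-- stated objective: alternative
-- what changed: B makes a single top-to-bottom pass over the rows, threading a per-column 'last non-empty value' fill vector and building each output row as it goes, instead of A's deepcopy followed by a separate in-place downward pass for every column.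
import Mathlib
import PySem

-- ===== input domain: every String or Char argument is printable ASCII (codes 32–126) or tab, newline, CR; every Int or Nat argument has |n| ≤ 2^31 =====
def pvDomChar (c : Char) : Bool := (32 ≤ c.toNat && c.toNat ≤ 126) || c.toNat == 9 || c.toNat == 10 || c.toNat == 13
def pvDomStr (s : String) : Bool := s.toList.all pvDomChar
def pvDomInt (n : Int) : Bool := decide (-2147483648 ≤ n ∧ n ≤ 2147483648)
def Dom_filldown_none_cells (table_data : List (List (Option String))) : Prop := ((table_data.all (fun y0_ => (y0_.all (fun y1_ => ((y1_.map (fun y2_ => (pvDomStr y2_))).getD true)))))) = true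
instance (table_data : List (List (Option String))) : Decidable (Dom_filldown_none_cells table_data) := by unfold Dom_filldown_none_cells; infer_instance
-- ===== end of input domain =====

-- B replaces A's column-by-column fill passes with a single top-to-bottom row pass that
-- folds a per-column "last seen value" vector through the rows (objective: alternative
-- decomposition, same O(rows·cols) cost). Equivalence is about the RETURN value; A copies
-- its input and mutates the copy, neither program mutates the argument.

-- ===== PORT A =====
-- `cell is None or cell == ''`
def pvCellEmpty (c : Option String) : Bool := c == none || c == some ""

-- A's inner loop `for row in range(len(result)): …` updating column `col` in place,
-- rendered as the structural recursion over the row list carrying `last_value`.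
def pvFillColumn (col : Nat) (last : Option String) : List (List (Option String)) → List (List (Option String))
  | [] => []
  | r :: rs =>
    let cell := r.getD col none
    if pvCellEmpty cell then r.set col last :: pvFillColumn col last rs
    else r :: pvFillColumn col cell rs

def filldown_none_cells (table_data : List (List (Option String))) : List (List (Option String)) :=
  if table_data.isEmpty then table_data
  else
    let cols := (table_data.headD []).length
    (List.range cols).foldl (fun res col => pvFillColumn col none res) table_data

-- ===== PORT B =====
-- one step of Source B's inner `for c in range(cols)` loop: state = (new_row so far, fill vector)
def pvBStep (row : List (Option String)) (acc : List (Option String) × List (Option String)) (c : Nat) :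
    List (Option String) × List (Option String) :=
  let cell := row.getD c none
  if pvCellEmpty cell then (acc.1 ++ [acc.2.getD c none], acc.2)
  else (acc.1 ++ [cell], acc.2.set c cell)

-- processing of one row: build new_row over range(cols), then `new_row.extend(row[cols:])`
def pvFillRow (cols : Nat) (fill row : List (Option String)) : List (Option String) × List (Option String) :=
  let p := (List.range cols).foldl (pvBStep row) ([], fill)
  (p.1 ++ row.drop cols, p.2)

-- Source B's outer `for row in table_data` loop threading the fill vector
def pvBRows (cols : Nat) (fill : List (Option String)) : List (List (Option String)) → List (List (Option String))
  | [] => []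
  | r :: rs =>
    let p := pvFillRow cols fill r
    p.1 :: pvBRows cols p.2 rs

def filldown_none_cells_alt (table_data : List (List (Option String))) : List (List (Option String)) :=
  if table_data.isEmpty then table_data
  else
    let cols := (table_data.headD []).length
    pvBRows cols (List.replicate cols none) table_data

-- ===== PRECONDITION & SPEC =====
-- Pre_ excludes ragged tables in which some row is shorter than the first row:
-- there Python A raises IndexError (and Python B raises the same way).
def Pre_filldown_none_cells (table_data : List (List (Option String))) : Prop :=
  ∀ r ∈ table_data, (table_data.headD []).length ≤ r.length
instance (table_data : List (List (Option String))) : Decidable (Pre_filldown_none_cells table_data) := by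
  unfold Pre_filldown_none_cells; infer_instance

def pvWitness_filldown_none_cells : List (List (Option String)) :=
  [[some "a", none], [none, some "b"], [some "", some "c"]]

def Spec_filldown_none_cells (table_data : List (List (Option String))) (out : List (List (Option String))) : Prop := out = filldown_none_cells_alt table_data
instance (table_data : List (List (Option String))) (out : List (List (Option String))) : Decidable (Spec_filldown_none_cells table_data out) := by unfold Spec_filldown_none_cells; infer_instance

-- ===== CLAIM (what is proved, stated in full; the proofs are below) =====
def Claim_equal_filldown_none_cells : Prop := ∀ (table_data : List (List (Option String))), Dom_filldown_none_cells table_data → Pre_filldown_none_cells table_data → Spec_filldown_none_cells table_data (filldown_none_cells table_data)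

-- ===== LEMMAS AND PROOFS =====

theorem pv_getD_set_ne (l : List (Option String)) (i j : Nat) (v d : Option String) (h : i ≠ j) :
    (l.set i v).getD j d = l.getD j d := by
  simp [List.getD_eq_getElem?_getD, List.getElem?_set_ne h]

-- iterating column passes over an empty table stays empty
theorem pv_fold_nil (js : List Nat) (f : List (Option String)) :
    js.foldl (fun res j => pvFillColumn j (f.getD j none) res) ([] : List (List (Option String))) = [] := by
  induction js with
  | nil => rfl
  | cons j js ih => simpa [pvFillColumn] using ih

theorem pvFillColumn_cons (col : Nat) (last : Option String) (r : List (Option String)) (rs : List (List (Option String))) :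
    pvFillColumn col last (r :: rs)
      = if pvCellEmpty (r.getD col none) then r.set col last :: pvFillColumn col last rs
        else r :: pvFillColumn col (r.getD col none) rs := rfl

theorem pvBStep_eq (row : List (Option String)) (acc : List (Option String) × List (Option String)) (c : Nat) :
    pvBStep row acc c
      = if pvCellEmpty (row.getD c none) then (acc.1 ++ [acc.2.getD c none], acc.2)
        else (acc.1 ++ [row.getD c none], acc.2.set c (row.getD c none)) := rfl

-- HEAD-PEELING: a full round of column passes over (r :: rs) = the in-place update of r,
-- consed onto a round over rs whose fill vector is advanced by r's non-empty cells.
theorem pv_head_peel (js : List Nat) (hnd : js.Nodup) :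
    ∀ (fill fill2 r : List (Option String)) (rs : List (List (Option String))),
      (∀ j ∈ js, fill2.getD j none
          = if pvCellEmpty (r.getD j none) then fill.getD j none else r.getD j none) →
      js.foldl (fun res j => pvFillColumn j (fill.getD j none) res) (r :: rs)
        = js.foldl (fun row j => if pvCellEmpty (row.getD j none) then row.set j (fill.getD j none) else row) r
          :: js.foldl (fun res j => pvFillColumn j (fill2.getD j none) res) rs := by
  induction js with
  | nil => intro fill fill2 r rs _; rfl
  | cons j js ih =>
    intro fill fill2 r rs h
    have hj : j ∉ js := (List.nodup_cons.mp hnd).1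
    have hnd' : js.Nodup := (List.nodup_cons.mp hnd).2
    have hjj := h j (by simp)
    simp only [List.foldl_cons]
    rw [pvFillColumn_cons]
    by_cases hc : pvCellEmpty (r.getD j none) = true
    · rw [if_pos hc, if_pos hc,
        ih hnd' fill fill2 (r.set j (fill.getD j none)) (pvFillColumn j (fill.getD j none) rs)
          (by
            intro j' hj'
            have hne : j ≠ j' := fun e => hj (e ▸ hj')
            rw [pv_getD_set_ne _ _ _ _ _ hne]
            exact h j' (by simp [hj'])),
        show pvFillColumn j (fill2.getD j none) rs = pvFillColumn j (fill.getD j none) rs by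
          rw [hjj, if_pos hc]]
    · rw [if_neg hc, if_neg hc,
        ih hnd' fill fill2 r (pvFillColumn j (r.getD j none) rs) (fun j' hj' => h j' (by simp [hj'])),
        show pvFillColumn j (fill2.getD j none) rs = pvFillColumn j (r.getD j none) rs by
          rw [hjj, if_neg hc]]

-- characterization of Source B's inner loop: new-row part is a map, fill part is a plain fold
theorem pv_bstep_char (row : List (Option String)) (js : List Nat) (hnd : js.Nodup) :
    ∀ (nr f : List (Option String)),
      js.foldl (pvBStep row) (nr, f)
        = (nr ++ js.map (fun j => if pvCellEmpty (row.getD j none) then f.getD j none else row.getD j none),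
           js.foldl (fun g j => if pvCellEmpty (row.getD j none) then g else g.set j (row.getD j none)) f) := by
  induction js with
  | nil => intro nr f; simp
  | cons j js ih =>
    intro nr f
    have hj : j ∉ js := (List.nodup_cons.mp hnd).1
    have hnd' : js.Nodup := (List.nodup_cons.mp hnd).2
    simp only [List.foldl_cons, List.map_cons]
    rw [pvBStep_eq]
    by_cases hc : pvCellEmpty (row.getD j none) = true
    · rw [if_pos hc, ih hnd' (nr ++ [f.getD j none]) f]
      rw [if_pos hc, List.append_assoc, if_pos hc]
      rfl
    · rw [if_neg hc, ih hnd' (nr ++ [row.getD j none]) (f.set j (row.getD j none))]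
      have : js.map (fun j' => if pvCellEmpty (row.getD j' none)
                then (f.set j (row.getD j none)).getD j' none else row.getD j' none)
           = js.map (fun j' => if pvCellEmpty (row.getD j' none) then f.getD j' none else row.getD j' none) := by
        apply List.map_congr_left
        intro j' hj'
        have : j ≠ j' := fun e => hj (e ▸ hj')
        rw [pv_getD_set_ne _ _ _ _ _ this]
      rw [this]
      rw [if_neg hc, List.append_assoc, if_neg hc]
      rfl

-- the fill-update fold preserves length
theorem pv_upd_len (row : List (Option String)) (js : List Nat) :
    ∀ f : List (Option String),
      (js.foldl (fun g j => if pvCellEmpty (row.getD j none) then g else g.set j (row.getD j none)) f).length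
        = f.length := by
  induction js with
  | nil => intro f; rfl
  | cons j js ih =>
    intro f
    simp only [List.foldl_cons]
    rw [ih]
    by_cases hc : pvCellEmpty (row.getD j none) = true
    · rw [if_pos hc]
    · rw [if_neg hc, List.length_set]

-- indices outside js are untouched by the fill-update fold
theorem pv_upd_frame (row : List (Option String)) (js : List Nat) (k : Nat) (hk : k ∉ js) :
    ∀ f : List (Option String),
      (js.foldl (fun g j => if pvCellEmpty (row.getD j none) then g else g.set j (row.getD j none)) f).getD k none
        = f.getD k none := by
  induction js with
  | nil => intro f; rfl
  | cons j js ih =>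
    intro f
    have hkj : j ≠ k := fun e => hk (by simp [e])
    have hk' : k ∉ js := fun h => hk (by simp [h])
    simp only [List.foldl_cons]
    rw [ih hk']
    by_cases hc : pvCellEmpty (row.getD j none) = true
    · rw [if_pos hc]
    · rw [if_neg hc, pv_getD_set_ne _ _ _ _ _ hkj]

-- value of the fill-update fold at an index of js
theorem pv_upd_char (row : List (Option String)) (js : List Nat) (hnd : js.Nodup) :
    ∀ (f : List (Option String)) (j : Nat), j ∈ js → j < f.length →
      (js.foldl (fun g j => if pvCellEmpty (row.getD j none) then g else g.set j (row.getD j none)) f).getD j none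
        = if pvCellEmpty (row.getD j none) then f.getD j none else row.getD j none := by
  induction js with
  | nil => intro f j hj; exact absurd hj (by simp)
  | cons j' js ih =>
    intro f j hj hlen
    have hj' : j' ∉ js := (List.nodup_cons.mp hnd).1
    have hnd' : js.Nodup := (List.nodup_cons.mp hnd).2
    simp only [List.foldl_cons]
    rcases List.mem_cons.mp hj with rfl | hmem
    · rw [pv_upd_frame row js j hj']
      by_cases hc : pvCellEmpty (row.getD j none) = true
      · rw [if_pos hc, if_pos hc]
      · rw [if_neg hc, if_neg hc]
        simp [List.getD_eq_getElem?_getD, hlen]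
    · have hne : j' ≠ j := fun e => hj' (e ▸ hmem)
      by_cases hc : pvCellEmpty (row.getD j' none) = true
      · rw [if_pos hc]
        exact ih hnd' _ j hmem hlen
      · rw [if_neg hc]
        rw [ih hnd' _ j hmem (by rw [List.length_set]; exact hlen)]
        rw [pv_getD_set_ne _ _ _ _ _ hne]

-- pointwise characterization of A's in-place head update
theorem pv_headstep_char (fill : List (Option String)) (js : List Nat) (hnd : js.Nodup) :
    ∀ r : List (Option String),
      (js.foldl (fun row j => if pvCellEmpty (row.getD j none) then row.set j (fill.getD j none) else row) r).length = r.length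
      ∧ ∀ k : Nat,
        (js.foldl (fun row j => if pvCellEmpty (row.getD j none) then row.set j (fill.getD j none) else row) r)[k]?
          = if k ∈ js ∧ pvCellEmpty (r.getD k none) = true ∧ k < r.length then some (fill.getD k none) else r[k]? := by
  induction js with
  | nil => intro r; exact ⟨rfl, fun k => by simp⟩
  | cons j js ih =>
    intro r
    have hj : j ∉ js := (List.nodup_cons.mp hnd).1
    have hnd' : js.Nodup := (List.nodup_cons.mp hnd).2
    simp only [List.foldl_cons]
    set r1 := (if pvCellEmpty (r.getD j none) then r.set j (fill.getD j none) else r) with hr1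
    have hlen1 : r1.length = r.length := by
      rw [hr1]
      by_cases hc : pvCellEmpty (r.getD j none) = true
      · rw [if_pos hc, List.length_set]
      · rw [if_neg hc]
    obtain ⟨ihlen, ihget⟩ := ih hnd' r1
    refine ⟨by rw [ihlen, hlen1], fun k => ?_⟩
    rw [ihget k]
    by_cases hkj : k = j
    · subst hkj
      have hknot : k ∉ js := hj
      rw [if_neg (by simp [hknot])]
      by_cases hc : pvCellEmpty (r.getD k none) = true
      · rw [hr1, if_pos hc] at *
        by_cases hlt : k < r.length
        · rw [if_pos ⟨by simp, hc, hlt⟩]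
          simp [hlt]
        · rw [if_neg (by intro h; exact hlt h.2.2)]
          have h1 : r[k]? = none := by
            rw [List.getElem?_eq_none_iff]; omega
          have h2 : (r.set k (fill.getD k none))[k]? = none := by
            rw [List.getElem?_eq_none_iff]; simpa using (by omega : r.length ≤ k)
          rw [h1, h2]
      · rw [hr1, if_neg hc]
        rw [if_neg (by intro h; exact hc h.2.1)]
    · have hr1k : r1.getD k none = r.getD k none := by
        rw [hr1]
        by_cases hc : pvCellEmpty (r.getD j none) = true
        · rw [if_pos hc, pv_getD_set_ne _ _ _ _ _ (fun e => hkj e.symm)]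
        · rw [if_neg hc]
      have hr1k' : r1[k]? = r[k]? := by
        rw [hr1]
        by_cases hc : pvCellEmpty (r.getD j none) = true
        · rw [if_pos hc, List.getElem?_set_ne (fun e => hkj e.symm)]
        · rw [if_neg hc]
      rw [hr1k, hr1k', hlen1]
      congr 1
      simp [List.mem_cons, hkj]

-- A's head update equals B's row output (given the row is wide enough)
theorem pv_row_eq (fill r : List (Option String)) (cols : Nat) (hw : cols ≤ r.length) :
    (List.range cols).foldl (fun row j => if pvCellEmpty (row.getD j none) then row.set j (fill.getD j none) else row) r
      = (pvFillRow cols fill r).1 := by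
  unfold pvFillRow
  rw [pv_bstep_char r (List.range cols) List.nodup_range [] fill]
  obtain ⟨hlen, hget⟩ := pv_headstep_char fill (List.range cols) List.nodup_range r
  apply List.ext_getElem?
  intro k
  rw [hget k]
  simp only [List.nil_append]
  by_cases hk : k < cols
  · have hkr : k < r.length := lt_of_lt_of_le hk hw
    have hmap : ((List.range cols).map
        (fun j => if pvCellEmpty (r.getD j none) then fill.getD j none else r.getD j none))[k]?
        = some (if pvCellEmpty (r.getD k none) then fill.getD k none else r.getD k none) := by
      rw [List.getElem?_map]
      simp [hk]
    rw [List.getElem?_append_left (by simpa using hk), hmap]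
    by_cases hc : pvCellEmpty (r.getD k none) = true
    · rw [if_pos ⟨List.mem_range.mpr hk, hc, hkr⟩, if_pos hc]
    · rw [if_neg (by intro h; exact hc h.2.1), if_neg hc]
      simp [List.getD_eq_getElem?_getD, List.getElem?_eq_getElem hkr]
  · rw [if_neg (by intro h; exact hk (List.mem_range.mp h.1))]
    rw [List.getElem?_append_right (by simpa using le_of_not_gt hk)]
    simp only [List.length_map, List.length_range]
    rw [List.getElem?_drop]
    congr 1
    omega

-- MAIN INDUCTION: a full set of column passes equals B's threaded row pass
theorem pv_main (cols : Nat) :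
    ∀ (rows : List (List (Option String))) (fill : List (Option String)),
      fill.length = cols → (∀ r ∈ rows, cols ≤ r.length) →
      (List.range cols).foldl (fun res j => pvFillColumn j (fill.getD j none) res) rows
        = pvBRows cols fill rows := by
  intro rows
  induction rows with
  | nil => intro fill _ _; rw [pv_fold_nil]; rfl
  | cons r rs ih =>
    intro fill hflen hw
    have hwr : cols ≤ r.length := hw r (by simp)
    have hfill2 : ∀ j ∈ List.range cols,
        ((pvFillRow cols fill r).2).getD j none
          = if pvCellEmpty (r.getD j none) then fill.getD j none else r.getD j none := by
      intro j hj
      unfold pvFillRow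
      rw [pv_bstep_char r (List.range cols) List.nodup_range [] fill]
      exact pv_upd_char r (List.range cols) List.nodup_range fill j hj
        (by rw [hflen]; exact List.mem_range.mp hj)
    rw [pv_head_peel (List.range cols) List.nodup_range fill ((pvFillRow cols fill r).2) r rs hfill2]
    rw [pv_row_eq fill r cols hwr]
    rw [ih ((pvFillRow cols fill r).2)
        (by unfold pvFillRow
            rw [pv_bstep_char r (List.range cols) List.nodup_range [] fill]
            simpa using (pv_upd_len r (List.range cols) fill).trans hflen)
        (fun r' hr' => hw r' (by simp [hr']))]
    rfl

-- the literal `none` A passes equals the replicate-fill's getD at every index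
theorem pv_replicate_getD (cols j : Nat) :
    (List.replicate cols (none : Option String)).getD j none = none := by
  simp only [List.getD_eq_getElem?_getD, List.getElem?_replicate]
  split <;> rfl

theorem pv_replicate_fill (cols : Nat) (js : List Nat) :
    ∀ rows : List (List (Option String)),
      js.foldl (fun res col => pvFillColumn col none res) rows
        = js.foldl (fun res j => pvFillColumn j ((List.replicate cols (none : Option String)).getD j none) res) rows := by
  induction js with
  | nil => intro rows; rfl
  | cons j js ih =>
    intro rows
    simp only [List.foldl_cons]
    rw [pv_replicate_getD]
    exact ih _

-- ===== VERDICT (by name: the statement is the Claim_ definition above) =====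
theorem filldown_none_cells_spec : Claim_equal_filldown_none_cells := by
  intro table_data _ hpre
  unfold Spec_filldown_none_cells filldown_none_cells filldown_none_cells_alt
  cases table_data with
  | nil => rfl
  | cons r0 rest =>
    simp only [List.isEmpty_cons, Bool.false_eq_true, if_false, List.headD_cons]
    rw [pv_replicate_fill r0.length (List.range r0.length) (r0 :: rest)]
    exact pv_main r0.length (r0 :: rest) (List.replicate r0.length none)
      (List.length_replicate) (by intro r hr; simpa using hpre r hr)
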